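-- pv_equiv track=rewrite | github.com/bert799/CodingInterviews | Practice6/solution.py | subarrayBitwiseORs
-- ===== SOURCE A (Python) =====
-- def subarrayBitwiseORs(arr: list[int]) -> int:
--     ans = set()
--     endwithThis = set()
--     for n in arr:
--         endwithThis = {n | x for x in endwithThis}
--         endwithThis.add(n)
--         ans |= endwithThis
--     return len(ans)
-- ===== SOURCE B (Python) =====
-- def subarrayBitwiseORs(arr: list[int]) -> int:
--     # naive nested loops: for each start index, scan right accumulating the OR
--     ans = set()
--     for i in range(len(arr)):
--         cur = 0
--         for x in arr[i:]:
--             cur |= x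
--             ans.add(cur)
--     return len(ans)
-- ===== Notes on version B (the rewrite author's own statement) =====
-- stated objective: simpler
-- what changed: B replaces A's single-pass frontier-set algorithm (maintaining the set of ORs of subarrays ending at the current element) with the plain nested-loop recomputation: for every start index it rescans to the end accumulating the running OR into one answer set.
import Mathlib
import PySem

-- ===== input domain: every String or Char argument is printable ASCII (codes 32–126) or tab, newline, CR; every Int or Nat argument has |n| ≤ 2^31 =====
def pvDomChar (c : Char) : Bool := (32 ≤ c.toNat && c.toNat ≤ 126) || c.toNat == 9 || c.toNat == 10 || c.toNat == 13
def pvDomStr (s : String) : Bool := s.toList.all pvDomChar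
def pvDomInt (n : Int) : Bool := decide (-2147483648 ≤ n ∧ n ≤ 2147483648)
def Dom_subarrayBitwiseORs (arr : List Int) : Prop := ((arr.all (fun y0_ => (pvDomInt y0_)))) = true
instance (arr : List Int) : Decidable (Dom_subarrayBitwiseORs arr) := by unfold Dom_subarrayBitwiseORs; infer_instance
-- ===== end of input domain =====

-- B replaces A's frontier-set single pass by the naive nested-loop recomputation (objective: simpler).

-- ===== PORT A =====
-- A: one pass, maintaining the set of ORs of subarrays ending at the current element.
def subarrayBitwiseORs (arr : List Int) : Int :=
  let st := arr.foldl
    (fun (st : PySem.Set Int × PySem.Set Int) n =>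
      let ew : PySem.Set Int :=
        PySem.Set.add (PySem.Set.ofList (st.2.map (fun x => PySem.Int.bor n x))) n
      (PySem.Set.union st.1 ew, ew))
    (PySem.Set.empty, PySem.Set.empty)
  PySem.Set.len st.1

-- ===== PORT B =====
-- B: for each start index i, rescan arr[i:] accumulating the running OR into one answer set.
def subarrayBitwiseORs_alt (arr : List Int) : Int :=
  let ans := (PySem.List.pyRange 0 (arr.length : Int)).foldl
    (fun (ans : PySem.Set Int) i =>
      ((PySem.List.slice arr (some i) none).foldl
        (fun (st : Int × PySem.Set Int) x =>
          let cur := PySem.Int.bor st.1 x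
          (cur, PySem.Set.add st.2 cur))
        (0, ans)).2)
    PySem.Set.empty
  PySem.Set.len ans

-- ===== PRECONDITION & SPEC =====
def Spec_subarrayBitwiseORs (arr : List Int) (out : Int) : Prop := out = subarrayBitwiseORs_alt arr
instance (arr : List Int) (out : Int) : Decidable (Spec_subarrayBitwiseORs arr out) := by unfold Spec_subarrayBitwiseORs; infer_instance

-- ===== CLAIM (what is proved, stated in full; the proofs are below) =====
def Claim_equal_subarrayBitwiseORs : Prop := ∀ (arr : List Int), Dom_subarrayBitwiseORs arr → Spec_subarrayBitwiseORs arr (subarrayBitwiseORs arr)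

-- ===== LEMMAS AND PROOFS =====

-- OR of l folded onto accumulator c
def orF (c : Int) (l : List Int) : Int := l.foldl PySem.Int.bor c

-- ORs of nonempty prefixes of l, each ORed onto c
def prefORs : Int → List Int → List Int
  | _, [] => []
  | c, x :: xs => (PySem.Int.bor c x) :: prefORs (PySem.Int.bor c x) xs

-- ORs of nonempty suffixes of l
def sufORs : List Int → List Int
  | [] => []
  | x :: xs => orF 0 (x :: xs) :: sufORs xs

-- ORs of all nonempty contiguous subarrays of l
def subORs : List Int → List Int
  | [] => []
  | x :: xs => prefORs 0 (x :: xs) ++ subORs xs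

theorem orF_append (c : Int) (l : List Int) (n : Int) :
    orF c (l ++ [n]) = PySem.Int.bor (orF c l) n := by
  simp [orF, List.foldl_append]

theorem prefORs_append (c : Int) (l : List Int) (n : Int) :
    prefORs c (l ++ [n]) = prefORs c l ++ [PySem.Int.bor (orF c l) n] := by
  induction l generalizing c with
  | nil => simp [prefORs, orF]
  | cons x xs ih => simp [prefORs, ih, orF]

theorem bor_zero_left (n : Int) : PySem.Int.bor 0 n = n := by
  rw [PySem.Int.bor_comm]; exact PySem.Int.bor_zero n

theorem mem_sufORs_append (l : List Int) (n v : Int) :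
    v ∈ sufORs (l ++ [n]) ↔ (∃ x ∈ sufORs l, v = PySem.Int.bor n x) ∨ v = n := by
  induction l with
  | nil => simp [sufORs, orF, bor_zero_left]
  | cons x xs ih =>
      have h1 : orF 0 (x :: (xs ++ [n])) = PySem.Int.bor (orF 0 (x :: xs)) n := by
        have := orF_append 0 (x :: xs) n
        simpa using this
      simp only [sufORs, List.cons_append, h1, List.mem_cons, ih]
      constructor
      · rintro (h | h | h)
        · exact Or.inl ⟨orF 0 (x :: xs), by simp, by rw [h, PySem.Int.bor_comm]⟩
        · rcases h with ⟨y, hy, hv⟩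
          exact Or.inl ⟨y, by simp [hy], hv⟩
        · exact Or.inr h
      · rintro (⟨y, hy, hv⟩ | h)
        · rcases hy with rfl | hy
          · exact Or.inl (by rw [hv, PySem.Int.bor_comm])
          · exact Or.inr (Or.inl ⟨y, hy, hv⟩)
        · exact Or.inr (Or.inr h)

theorem mem_subORs_append (l : List Int) (n v : Int) :
    v ∈ subORs (l ++ [n]) ↔ v ∈ subORs l ∨ v ∈ sufORs (l ++ [n]) := by
  induction l with
  | nil => simp [subORs, prefORs, sufORs, orF]
  | cons x xs ih =>
      have h1 : orF 0 (x :: (xs ++ [n])) = PySem.Int.bor (orF 0 (x :: xs)) n := by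
        have := orF_append 0 (x :: xs) n
        simpa using this
      have h2 : prefORs 0 (x :: (xs ++ [n])) =
          prefORs 0 (x :: xs) ++ [PySem.Int.bor (orF 0 (x :: xs)) n] := by
        have := prefORs_append 0 (x :: xs) n
        simpa using this
      simp only [subORs, sufORs, List.cons_append, h1, h2, List.mem_append, List.mem_cons, ih]
      tauto

-- A's loop body, named for the proofs
def stepA (st : PySem.Set Int × PySem.Set Int) (n : Int) : PySem.Set Int × PySem.Set Int :=
  let ew : PySem.Set Int :=
    PySem.Set.add (PySem.Set.ofList (st.2.map (fun x => PySem.Int.bor n x))) n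
  (PySem.Set.union st.1 ew, ew)

theorem portA_eq (arr : List Int) :
    subarrayBitwiseORs arr = PySem.Set.len (arr.foldl stepA (PySem.Set.empty, PySem.Set.empty)).1 := rfl

theorem AInv (arr : List Int) :
    (arr.foldl stepA (PySem.Set.empty, PySem.Set.empty)).1.Nodup ∧
    (arr.foldl stepA (PySem.Set.empty, PySem.Set.empty)).2.Nodup ∧
    (∀ v, v ∈ (arr.foldl stepA (PySem.Set.empty, PySem.Set.empty)).1 ↔ v ∈ subORs arr) ∧
    (∀ v, v ∈ (arr.foldl stepA (PySem.Set.empty, PySem.Set.empty)).2 ↔ v ∈ sufORs arr) := by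
  induction arr using List.reverseRecOn with
  | nil => simp [subORs, sufORs, PySem.Set.empty]
  | append_singleton l n ih =>
      obtain ⟨hn1, hn2, hm1, hm2⟩ := ih
      set st := l.foldl stepA (PySem.Set.empty, PySem.Set.empty) with hst
      have hfold : (l ++ [n]).foldl stepA (PySem.Set.empty, PySem.Set.empty) = stepA st n := by
        simp [List.foldl_append, hst]
      have hewmem : ∀ v, v ∈ (stepA st n).2 ↔ v ∈ sufORs (l ++ [n]) := by
        intro v
        simp only [stepA, PySem.Set.mem_add, PySem.Set.mem_ofList, List.mem_map,
          mem_sufORs_append]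
        constructor
        · rintro (⟨x, hx, rfl⟩ | rfl)
          · exact Or.inl ⟨x, (hm2 x).mp hx, rfl⟩
          · exact Or.inr rfl
        · rintro (⟨x, hx, rfl⟩ | rfl)
          · exact Or.inl ⟨x, (hm2 x).mpr hx, rfl⟩
          · exact Or.inr rfl
      refine ⟨?_, ?_, ?_, ?_⟩
      · rw [hfold]
        exact PySem.Set.nodup_union _ _ hn1
      · rw [hfold]
        exact PySem.Set.nodup_add _ _ (PySem.Set.nodup_ofList _)
      · intro v
        rw [hfold]
        show v ∈ PySem.Set.union st.1 (stepA st n).2 ↔ _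
        rw [PySem.Set.mem_union, mem_subORs_append, hm1, hewmem]
      · intro v
        rw [hfold]
        exact hewmem v

-- B's inner loop, named for the proofs
def innerFold (l : List Int) (c : Int) (ans : PySem.Set Int) : Int × PySem.Set Int :=
  l.foldl
    (fun (st : Int × PySem.Set Int) x =>
      let cur := PySem.Int.bor st.1 x
      (cur, PySem.Set.add st.2 cur))
    (c, ans)

theorem innerInv (l : List Int) : ∀ (c : Int) (ans : PySem.Set Int), ans.Nodup →
    (innerFold l c ans).2.Nodup ∧
    (∀ v, v ∈ (innerFold l c ans).2 ↔ v ∈ ans ∨ v ∈ prefORs c l) := by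
  induction l with
  | nil => intro c ans h; simp [innerFold, prefORs, h]
  | cons x xs ih =>
      intro c ans h
      have hstep : innerFold (x :: xs) c ans =
          innerFold xs (PySem.Int.bor c x) (PySem.Set.add ans (PySem.Int.bor c x)) := rfl
      obtain ⟨hn, hm⟩ := ih (PySem.Int.bor c x) (PySem.Set.add ans (PySem.Int.bor c x))
        (PySem.Set.nodup_add _ _ h)
      rw [hstep]
      refine ⟨hn, fun v => ?_⟩
      rw [hm v, PySem.Set.mem_add]
      simp only [prefORs, List.mem_cons]
      tauto

theorem outerInv (arr : List Int) (is : List Nat) :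
    ∀ (ans : PySem.Set Int), ans.Nodup →
    (is.foldl (fun a i => (innerFold (arr.drop i) 0 a).2) ans).Nodup ∧
    (∀ v, v ∈ is.foldl (fun a i => (innerFold (arr.drop i) 0 a).2) ans ↔
      v ∈ ans ∨ ∃ i ∈ is, v ∈ prefORs 0 (arr.drop i)) := by
  induction is with
  | nil => intro ans h; simp [h]
  | cons i is ih =>
      intro ans h
      obtain ⟨hn, hm⟩ := innerInv (arr.drop i) 0 ans h
      obtain ⟨hn', hm'⟩ := ih _ hn
      refine ⟨hn', fun v => ?_⟩
      simp only [List.foldl_cons, hm' v, hm v, List.mem_cons]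
      constructor
      · rintro ((h | h) | ⟨j, hj, hv⟩)
        · exact Or.inl h
        · exact Or.inr ⟨i, Or.inl rfl, h⟩
        · exact Or.inr ⟨j, Or.inr hj, hv⟩
      · rintro (h | ⟨j, (rfl | hj), hv⟩)
        · exact Or.inl (Or.inl h)
        · exact Or.inl (Or.inr hv)
        · exact Or.inr ⟨j, hj, hv⟩

theorem subORs_char (arr : List Int) (v : Int) :
    v ∈ subORs arr ↔ ∃ i ∈ List.range arr.length, v ∈ prefORs 0 (arr.drop i) := by
  induction arr with
  | nil => simp [subORs]
  | cons x xs ih =>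
      simp only [subORs, List.mem_append, ih, List.length_cons, List.range_succ_eq_map,
        List.mem_cons, List.mem_map]
      constructor
      · rintro (h | ⟨i, hi, hv⟩)
        · exact ⟨0, Or.inl rfl, by simpa using h⟩
        · exact ⟨i + 1, Or.inr ⟨i, hi, rfl⟩, by simpa using hv⟩
      · rintro ⟨j, (rfl | ⟨i, hi, rfl⟩), hv⟩
        · exact Or.inl (by simpa using hv)
        · exact Or.inr ⟨i, hi, by simpa using hv⟩

theorem portB_eq (arr : List Int) :
    subarrayBitwiseORs_alt arr =
      PySem.Set.len ((List.range arr.length).foldl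
        (fun a i => (innerFold (arr.drop i) 0 a).2) PySem.Set.empty) := by
  unfold subarrayBitwiseORs_alt
  rw [PySem.List.pyRange_zero_natCast, List.foldl_map]
  exact congrArg PySem.Set.len
    (PySem.List.foldl_congr_mem _ _ _ _ (fun acc i _ => by rw [PySem.List.slice_from_natCast]; rfl))

theorem len_eq_of_same_members (s t : PySem.Set Int) (hs : s.Nodup) (ht : t.Nodup)
    (h : ∀ v, v ∈ s ↔ v ∈ t) : PySem.Set.len s = PySem.Set.len t := by
  have hperm : List.Perm s t := (List.perm_ext_iff_of_nodup hs ht).mpr h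
  simp [PySem.Set.len, hperm.length_eq]

-- ===== VERDICT (by name: the statement is the Claim_ definition above) =====
theorem subarrayBitwiseORs_spec : Claim_equal_subarrayBitwiseORs := by
  intro arr _
  show subarrayBitwiseORs arr = subarrayBitwiseORs_alt arr
  rw [portA_eq, portB_eq]
  obtain ⟨hnA, _, hmA, _⟩ := AInv arr
  obtain ⟨hnB, hmB⟩ := outerInv arr (List.range arr.length) PySem.Set.empty (by simp [PySem.Set.empty])
  apply len_eq_of_same_members _ _ hnA hnB
  intro v
  rw [hmA v, hmB v, subORs_char]
  simp [PySem.Set.empty]
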